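-- pv_equiv track=rewrite | github.com/bc36/leetcode | lc_Python/lc2300_2399.py | minNumberOfHours
-- ===== SOURCE A (Python) =====
-- from typing import List, Optional, Tuple
--
-- def minNumberOfHours(
--     inEn: int, inEx: int, energy: List[int], experience: List[int]
-- ) -> int:
--     ans = 0
--     for n, x in zip(energy, experience):
--         if inEn <= n:
--             ans += n - inEn + 1
--             inEn = n + 1
--         inEn -= n
--         if inEx <= x:
--             ans += x - inEx + 1
--             inEx = x + 1
--         inEx += x
--     return ans
-- ===== SOURCE B (Python) =====
-- def minNumberOfHours(inEn, inEx, energy, experience):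
--     k = min(len(energy), len(experience))
--     # Energy part: energy only decreases, so the extra hours needed are
--     # max over prefixes of (prefix_sum + 1 - inEn), never below 0.
--     p = 0
--     m = 0
--     for v in energy[:k]:
--         p += v
--         m = max(m, p + 1 - inEn)
--     ans = m
--     # Experience part: branch-free max arithmetic.
--     cur = inEx
--     for x in experience[:k]:
--         ans += max(0, x + 1 - cur)
--         cur = max(cur + x, 2 * x + 1)
--     return ans
-- ===== Notes on version B (the rewrite author's own statement) =====
-- stated objective: alternative
-- what changed: Replaces A's single interleaved loop over zip(energy, experience) with two independent passes: the energy cost is obtained as a running maximum over prefix sums (max(0, max_k prefix_k + 1 - inEn)), and the experience cost as a branch-free scan using max arithmetic instead of if-branches.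
import Mathlib
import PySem

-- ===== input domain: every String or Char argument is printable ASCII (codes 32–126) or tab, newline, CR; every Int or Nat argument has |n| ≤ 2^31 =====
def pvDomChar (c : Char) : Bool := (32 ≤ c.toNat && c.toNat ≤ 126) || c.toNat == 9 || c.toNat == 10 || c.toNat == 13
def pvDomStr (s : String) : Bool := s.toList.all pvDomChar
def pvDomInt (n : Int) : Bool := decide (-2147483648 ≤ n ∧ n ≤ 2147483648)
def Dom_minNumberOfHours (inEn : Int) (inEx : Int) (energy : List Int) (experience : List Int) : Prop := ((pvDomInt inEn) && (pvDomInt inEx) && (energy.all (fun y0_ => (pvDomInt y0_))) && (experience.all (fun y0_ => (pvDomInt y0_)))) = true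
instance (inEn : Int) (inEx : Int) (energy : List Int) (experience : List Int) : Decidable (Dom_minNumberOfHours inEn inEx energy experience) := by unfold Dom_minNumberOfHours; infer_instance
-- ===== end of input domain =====

-- B replaces A's interleaved zip loop by a prefix-max scan for the energy cost
-- plus a branch-free max-arithmetic scan for the experience cost (objective: alternative).

-- ===== PORT A =====
-- the for-loop over zip(energy, experience) with state (ans, inEn, inEx), step for step
def pvALoop : List (Int × Int) → Int → Int → Int → Int
  | [], ans, _, _ => ans
  | (n, x) :: t, ans, inEn, inEx =>
    let ans1 := if inEn ≤ n then ans + (n - inEn + 1) else ans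
    let inEn1 := (if inEn ≤ n then n + 1 else inEn) - n
    let ans2 := if inEx ≤ x then ans1 + (x - inEx + 1) else ans1
    let inEx1 := (if inEx ≤ x then x + 1 else inEx) + x
    pvALoop t ans2 inEn1 inEx1

def minNumberOfHours (inEn : Int) (inEx : Int) (energy : List Int) (experience : List Int) : Int :=
  pvALoop (energy.zip experience) 0 inEn inEx

-- ===== PORT B =====
-- Source B's first loop: running prefix sum p and running maximum m of p + 1 - inEn
def pvEFold (inEn : Int) : List Int → Int → Int → Int
  | [], _, m => m
  | v :: t, p, m => pvEFold inEn t (p + v) (max m (p + v + 1 - inEn))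

-- Source B's second loop: state (ans, cur)
def pvXFold : List Int → Int → Int → Int
  | [], ans, _ => ans
  | x :: t, ans, cur => pvXFold t (ans + max 0 (x + 1 - cur)) (max (cur + x) (2 * x + 1))

def minNumberOfHours_alt (inEn : Int) (inEx : Int) (energy : List Int) (experience : List Int) : Int :=
  let k := min energy.length experience.length
  pvXFold (experience.take k) (pvEFold inEn (energy.take k) 0 0) inEx

-- ===== PRECONDITION & SPEC =====
def Spec_minNumberOfHours (inEn : Int) (inEx : Int) (energy : List Int) (experience : List Int) (out : Int) : Prop := out = minNumberOfHours_alt inEn inEx energy experience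
instance (inEn : Int) (inEx : Int) (energy : List Int) (experience : List Int) (out : Int) : Decidable (Spec_minNumberOfHours inEn inEx energy experience out) := by unfold Spec_minNumberOfHours; infer_instance

-- ===== CLAIM (what is proved, stated in full; the proofs are below) =====
def Claim_equal_minNumberOfHours : Prop := ∀ (inEn : Int) (inEx : Int) (energy : List Int) (experience : List Int), Dom_minNumberOfHours inEn inEx energy experience → Spec_minNumberOfHours inEn inEx energy experience (minNumberOfHours inEn inEx energy experience)

-- ===== LEMMAS AND PROOFS =====

-- A's per-step energy cost, isolated: the cost A charges on the energy side
def pvGE : List Int → Int → Int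
  | [], _ => 0
  | n :: t, en => (if en ≤ n then n - en + 1 else 0) + pvGE t ((if en ≤ n then n + 1 else en) - n)

-- A's per-step experience cost, isolated
def pvGX : List Int → Int → Int
  | [], _ => 0
  | x :: t, ex => (if ex ≤ x then x - ex + 1 else 0) + pvGX t ((if ex ≤ x then x + 1 else ex) + x)

-- A's single loop splits into the two independent costs
theorem pvALoop_split : ∀ (l : List (Int × Int)) (ans en ex : Int),
    pvALoop l ans en ex = ans + pvGE (l.map Prod.fst) en + pvGX (l.map Prod.snd) ex := by
  intro l
  induction l with
  | nil => intro ans en ex; simp [pvALoop, pvGE, pvGX]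
  | cons h t ih =>
    rcases h with ⟨n, x⟩
    intro ans en ex
    simp only [pvALoop, List.map_cons, pvGE, pvGX]
    rw [ih]
    split_ifs <;> ring

-- the (p, m) fold of B equals m plus A's energy cost started at m + inEn - p
theorem pvEFold_eq : ∀ (inEn : Int) (ns : List Int) (p m : Int), 0 ≤ m →
    pvEFold inEn ns p m = m + pvGE ns (m + inEn - p) := by
  intro inEn ns
  induction ns with
  | nil => intro p m _; simp [pvEFold, pvGE]
  | cons v t ih =>
    intro p m hm
    simp only [pvEFold, pvGE]
    rw [ih (p + v) (max m (p + v + 1 - inEn)) (by omega)]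
    have h1 : max m (p + v + 1 - inEn) + inEn - (p + v)
        = (if m + inEn - p ≤ v then v + 1 else m + inEn - p) - v := by omega
    rw [h1]
    split_ifs with h
    · have h2 : max m (p + v + 1 - inEn) = p + v + 1 - inEn := by omega
      rw [h2]; ring
    · have h2 : max m (p + v + 1 - inEn) = m := by omega
      rw [h2]; ring

-- B's experience fold equals ans plus A's experience cost
theorem pvXFold_eq : ∀ (xs : List Int) (ans cur : Int),
    pvXFold xs ans cur = ans + pvGX xs cur := by
  intro xs
  induction xs with
  | nil => intro ans cur; simp [pvXFold, pvGX]
  | cons x t ih =>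
    intro ans cur
    simp only [pvXFold, pvGX]
    rw [ih]
    have h1 : max (cur + x) (2 * x + 1) = (if cur ≤ x then x + 1 else cur) + x := by omega
    rw [h1]
    have h2 : ans + max 0 (x + 1 - cur) = ans + (if cur ≤ x then x - cur + 1 else 0) := by omega
    rw [h2]
    ring

theorem zip_map_fst : ∀ (l1 l2 : List Int),
    (l1.zip l2).map Prod.fst = l1.take (min l1.length l2.length) := by
  intro l1
  induction l1 with
  | nil => intro l2; simp
  | cons a t ih =>
    intro l2
    cases l2 with
    | nil => simp
    | cons b s => simp [List.zip_cons_cons, ih s, Nat.succ_min_succ]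

theorem zip_map_snd : ∀ (l1 l2 : List Int),
    (l1.zip l2).map Prod.snd = l2.take (min l1.length l2.length) := by
  intro l1
  induction l1 with
  | nil => intro l2; simp
  | cons a t ih =>
    intro l2
    cases l2 with
    | nil => simp
    | cons b s => simp [List.zip_cons_cons, ih s, Nat.succ_min_succ]

-- ===== VERDICT (by name: the statement is the Claim_ definition above) =====
theorem minNumberOfHours_spec : Claim_equal_minNumberOfHours := by
  intro inEn inEx energy experience _
  show minNumberOfHours inEn inEx energy experience = minNumberOfHours_alt inEn inEx energy experience
  unfold minNumberOfHours minNumberOfHours_alt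
  rw [pvALoop_split, pvXFold_eq, pvEFold_eq inEn _ 0 0 le_rfl,
      zip_map_fst, zip_map_snd]
  ring_nf
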